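-- pv_equiv track=rewrite | github.com/rlazarus/Placebo | app.py | split_correct
-- ===== SOURCE A (Python) =====
-- from typing import Any, Dict, Tuple
--
-- def split_correct(text: str) -> Tuple[str, str]:
--     words = text.split()
--     solution_start = len(words)
--     while solution_start >= 1 and words[solution_start - 1].isupper():
--         solution_start -= 1
--     puzzle_name = ' '.join(words[:solution_start])
--     solution = ' '.join(words[solution_start:])
--     if not puzzle_name or not solution:
--         raise ValueError('No caps, or all caps')
--     return puzzle_name, solution
-- ===== SOURCE B (Python) =====
-- def split_correct(text):
--     words = text.split()
--     last_non_upper = -1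
--     for i, w in enumerate(words):
--         if not w.isupper():
--             last_non_upper = i
--     k = last_non_upper + 1
--     puzzle_name = ' '.join(words[:k])
--     solution = ' '.join(words[k:])
--     if not puzzle_name or not solution:
--         raise ValueError('No caps, or all caps')
--     return puzzle_name, solution
-- ===== Notes on version B (the rewrite author's own statement) =====
-- stated objective: alternative
-- what changed: The backward while-loop with index arithmetic is replaced by a single forward enumerate pass accumulating the index of the last non-uppercase word; the boundary is that index plus one.
import Mathlib
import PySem

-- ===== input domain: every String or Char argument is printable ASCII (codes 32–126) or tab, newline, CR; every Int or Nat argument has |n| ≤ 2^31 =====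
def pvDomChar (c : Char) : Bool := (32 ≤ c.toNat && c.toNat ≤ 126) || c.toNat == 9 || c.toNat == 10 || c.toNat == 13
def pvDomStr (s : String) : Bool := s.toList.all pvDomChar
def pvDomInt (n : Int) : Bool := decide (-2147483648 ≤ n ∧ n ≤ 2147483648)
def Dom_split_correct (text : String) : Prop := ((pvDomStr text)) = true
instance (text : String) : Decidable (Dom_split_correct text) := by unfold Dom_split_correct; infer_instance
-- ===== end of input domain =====

-- B replaces A's backward while-loop by a forward enumerate pass tracking the last non-uppercase word (alternative decomposition, same cost).

-- ===== PORT A =====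
-- str.isupper(): at least one cased character and no lowercase one — exact on the ASCII domain,
-- where the cased characters are exactly a-z and A-Z.
def wordUpper (w : String) : Bool :=
  w.toList.all (fun c => !(PySem.Chars.islower c)) && w.toList.any (fun c => PySem.Chars.isupper c)

-- the while-loop 'while solution_start >= 1 and words[solution_start-1].isupper(): solution_start -= 1';
-- the index solution_start-1 is always in range, so pyGet? is some and .getD "" never fires.
def splitA_loop (ws : List String) : Nat → Nat
  | 0 => 0
  | n + 1 => if wordUpper ((PySem.List.pyGet? ws ((n : Int))).getD "") then splitA_loop ws n else n + 1

def split_correct (text : String) : String × String :=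
  let words := PySem.Str.split₀ text
  let solution_start := splitA_loop words words.length
  let puzzle_name := PySem.Str.join " " (PySem.List.slice words none (some (solution_start : Int)))
  let solution := PySem.Str.join " " (PySem.List.slice words (some (solution_start : Int)) none)
  if puzzle_name = "" ∨ solution = "" then ("", "")  -- Python raises ValueError here; outside Pre_
  else (puzzle_name, solution)

-- ===== PORT B =====
def split_correct_alt (text : String) : String × String :=
  let words := PySem.Str.split₀ text
  let lastNonUpper := (PySem.List.enumerate words).foldl
    (fun acc iw => if !(wordUpper iw.2) then iw.1 else acc) (-1 : Int)
  let k := lastNonUpper + 1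
  let puzzle_name := PySem.Str.join " " (PySem.List.slice words none (some k))
  let solution := PySem.Str.join " " (PySem.List.slice words (some k) none)
  if puzzle_name = "" ∨ solution = "" then ("", "")  -- Python raises ValueError here; outside Pre_
  else (puzzle_name, solution)

-- ===== PRECONDITION & SPEC =====
-- Pre_ excludes exactly the inputs on which A raises ValueError('No caps, or all caps'):
-- the last word must be uppercase and some word must not be.
def Pre_split_correct (text : String) : Prop :=
  ((PySem.Str.split₀ text).getLast?.map wordUpper = some true) ∧
  ((PySem.Str.split₀ text).any (fun w => !wordUpper w) = true)
instance (text : String) : Decidable (Pre_split_correct text) := by unfold Pre_split_correct; infer_instance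
def pvWitness_split_correct : String := "foo bar BAZ"
def Spec_split_correct (text : String) (out : String × String) : Prop := out = split_correct_alt text
instance (text : String) (out : String × String) : Decidable (Spec_split_correct text out) := by unfold Spec_split_correct; infer_instance

-- ===== CLAIM (what is proved, stated in full; the proofs are below) =====
def Claim_equal_split_correct : Prop := ∀ (text : String), Dom_split_correct text → Pre_split_correct text → Spec_split_correct text (split_correct text)

-- ===== LEMMAS AND PROOFS =====

-- A's loop never reads past the first ws.length entries, so appending a word does not change it.
lemma splitA_loop_append (ws : List String) (w : String) :
    ∀ n, n ≤ ws.length → splitA_loop (ws ++ [w]) n = splitA_loop ws n := by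
  intro n
  induction n with
  | zero => intro _; rfl
  | succ m ih =>
    intro h
    have hm : m < ws.length := h
    simp only [splitA_loop, PySem.List.pyGet?_natCast, List.getElem?_append_left hm]
    rw [ih (Nat.le_of_lt hm)]

-- main boundary equality: A's loop = B's fold + 1
lemma boundary_eq (ws : List String) :
    ((splitA_loop ws ws.length : Nat) : Int) =
      (PySem.List.enumerate ws).foldl
        (fun acc iw => if !(wordUpper iw.2) then iw.1 else acc) (-1 : Int) + 1 := by
  induction ws using List.reverseRecOn with
  | nil => simp [splitA_loop, PySem.List.enumerate_nil]
  | append_singleton ws w ih =>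
    have hlen : (ws ++ [w]).length = ws.length + 1 := by simp
    rw [hlen, PySem.List.enumerate_append, List.foldl_append]
    simp only [splitA_loop, PySem.List.pyGet?_natCast, List.getElem?_append_right (le_refl _),
      Nat.sub_self, List.getElem?_cons_zero, Option.getD_some,
      PySem.List.enumerate_cons, PySem.List.enumerate_nil, List.foldl_cons, List.foldl_nil]
    by_cases hw : wordUpper w
    · rw [if_pos hw, splitA_loop_append ws w ws.length (le_refl _), ih]
      simp [hw]
    · rw [if_neg hw]
      simp [hw]

-- ===== VERDICT (by name: the statement is the Claim_ definition above) =====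
theorem split_correct_spec : Claim_equal_split_correct := by
  intro text _ _
  unfold Spec_split_correct
  simp only [split_correct, split_correct_alt]
  rw [← boundary_eq (PySem.Str.split₀ text)]
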